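-- pv_equiv track=rewrite | github.com/mrveiss/AutoBot-AI | src/knowledge/search.py | _combine_tag_fact_sets
-- ===== SOURCE A (Python) =====
-- from typing import TYPE_CHECKING, Any, Dict, List, Optional, Set
--
-- def _combine_tag_fact_sets(tag_fact_sets: List[Set[str]], match_all: bool) -> Set[str]:
--     """Combine fact sets based on match_all flag. Issue #281: Extracted helper."""
--     if not tag_fact_sets:
--         return set()
--     if match_all:
--         result_ids = tag_fact_sets[0]
--         for fact_set in tag_fact_sets[1:]:
--             result_ids = result_ids.intersection(fact_set)
--     else:
--         result_ids = set()
--         for fact_set in tag_fact_sets: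
--             result_ids = result_ids.union(fact_set)
--     return result_ids
-- ===== SOURCE B (Python) =====
-- def _combine_tag_fact_sets(tag_fact_sets, match_all):
--     """Frequency-table version: count each fact once per set, then filter."""
--     counts = {}
--     for fact_set in tag_fact_sets:
--         for x in fact_set:
--             counts[x] = counts.get(x, 0) + 1
--     if match_all:
--         n = len(tag_fact_sets)
--         return {x for x, c in counts.items() if c == n}
--     return set(counts)
-- ===== Notes on version B (the rewrite author's own statement) =====
-- stated objective: alternative
-- what changed: Replaces the pairwise intersection/union fold with a single frequency-table pass (count each fact once per set) followed by one filtering pass (count == len for intersection, all keys for union).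
import Mathlib
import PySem

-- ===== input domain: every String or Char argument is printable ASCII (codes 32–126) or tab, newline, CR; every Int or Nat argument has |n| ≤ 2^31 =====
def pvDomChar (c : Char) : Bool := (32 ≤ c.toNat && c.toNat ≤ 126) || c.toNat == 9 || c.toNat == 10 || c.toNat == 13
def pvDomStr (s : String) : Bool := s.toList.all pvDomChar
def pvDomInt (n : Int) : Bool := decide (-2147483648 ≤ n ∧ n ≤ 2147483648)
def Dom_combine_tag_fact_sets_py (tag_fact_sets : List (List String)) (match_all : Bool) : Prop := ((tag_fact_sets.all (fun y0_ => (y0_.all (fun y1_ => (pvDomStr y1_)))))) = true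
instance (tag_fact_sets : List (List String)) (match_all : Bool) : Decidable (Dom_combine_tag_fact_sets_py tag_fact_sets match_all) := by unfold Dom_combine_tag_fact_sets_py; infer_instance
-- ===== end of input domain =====

-- B replaces the intersection/union fold with one counting pass over all sets and one filtering pass (alternative decomposition, same cost).
-- Equivalence is about the RETURN value (Python A may return the first set object itself when match_all and len==1; values agree).

-- ===== PORT A =====
def combine_tag_fact_sets_py (tag_fact_sets : List (List String)) (match_all : Bool) : List String :=
  match tag_fact_sets with
  | [] => []  -- if not tag_fact_sets: return set()
  | s0 :: rest =>
    if match_all then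
      -- result_ids = tag_fact_sets[0]; for fact_set in tag_fact_sets[1:]: result_ids = result_ids.intersection(fact_set)
      rest.foldl (fun r s => PySem.Set.inter r s) s0
    else
      -- result_ids = set(); for fact_set in tag_fact_sets: result_ids = result_ids.union(fact_set)
      (s0 :: rest).foldl (fun r s => PySem.Set.union r s) PySem.Set.empty

-- ===== PORT B =====
def combine_tag_fact_sets_py_alt (tag_fact_sets : List (List String)) (match_all : Bool) : List String :=
  -- counts = {}; for fact_set in tag_fact_sets: for x in fact_set: counts[x] = counts.get(x, 0) + 1
  let counts := tag_fact_sets.foldl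
    (fun d s => s.foldl (fun d x => d.insert x (d.getD x 0 + 1)) d) PySem.Dict.empty
  if match_all then
    -- {x for x, c in counts.items() if c == len(tag_fact_sets)}
    PySem.Set.ofList (counts.items.filterMap
      (fun p => if p.2 = (tag_fact_sets.length : Int) then some p.1 else none))
  else
    -- set(counts)
    PySem.Set.ofList counts.keys

-- ===== PRECONDITION & SPEC =====
-- Python's arguments are sets of strings; Pre_ states that representation invariant: each inner
-- list holds distinct elements. (It excludes no input the Python function accepts: a Python set
-- cannot contain duplicates.)
def Pre_combine_tag_fact_sets_py (tag_fact_sets : List (List String)) (match_all : Bool) : Prop :=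
  ∀ s ∈ tag_fact_sets, s.Nodup
instance (tag_fact_sets : List (List String)) (match_all : Bool) : Decidable (Pre_combine_tag_fact_sets_py tag_fact_sets match_all) := by unfold Pre_combine_tag_fact_sets_py; infer_instance

def pvWitness_combine_tag_fact_sets_py : List (List String) × Bool := ([["a", "b"], ["b", "c"]], true)

def Spec_combine_tag_fact_sets_py (tag_fact_sets : List (List String)) (match_all : Bool) (out : List String) : Prop := out = combine_tag_fact_sets_py_alt tag_fact_sets match_all
instance (tag_fact_sets : List (List String)) (match_all : Bool) (out : List String) : Decidable (Spec_combine_tag_fact_sets_py tag_fact_sets match_all out) := by unfold Spec_combine_tag_fact_sets_py; infer_instance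

-- ===== CLAIM (what is proved, stated in full; the proofs are below) =====
def Claim_equal_combine_tag_fact_sets_py : Prop := ∀ (tag_fact_sets : List (List String)) (match_all : Bool), Dom_combine_tag_fact_sets_py tag_fact_sets match_all → Pre_combine_tag_fact_sets_py tag_fact_sets match_all → Spec_combine_tag_fact_sets_py tag_fact_sets match_all (combine_tag_fact_sets_py tag_fact_sets match_all)

-- ===== LEMMAS AND PROOFS =====

theorem count_flatten_le (tfs : List (List String)) (x : String)
    (h : ∀ s ∈ tfs, s.Nodup) : tfs.flatten.count x ≤ tfs.length := by
  induction tfs with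
  | nil => simp
  | cons s rest ih =>
    have h1 : s.count x ≤ 1 := List.nodup_iff_count_le_one.mp (h s (by simp)) x
    have h2 := ih (fun t ht => h t (by simp [ht]))
    simp only [List.flatten_cons, List.count_append, List.length_cons]
    omega

theorem count_flatten_eq_iff (tfs : List (List String)) (x : String)
    (h : ∀ s ∈ tfs, s.Nodup) : tfs.flatten.count x = tfs.length ↔ ∀ s ∈ tfs, x ∈ s := by
  induction tfs with
  | nil => simp
  | cons s rest ih =>
    have h0 : s.Nodup := h s (by simp)
    have h1 : s.count x ≤ 1 := List.nodup_iff_count_le_one.mp h0 x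
    have h2 := count_flatten_le rest x (fun t ht => h t (by simp [ht]))
    have ihh := ih (fun t ht => h t (by simp [ht]))
    simp only [List.flatten_cons, List.count_append, List.length_cons, List.mem_cons]
    constructor
    · intro he
      have hc1 : s.count x = 1 := by omega
      have hcr : rest.flatten.count x = rest.length := by omega
      have hx : x ∈ s := by
        by_contra hx
        rw [List.count_eq_zero_of_not_mem hx] at hc1
        omega
      intro t ht
      rcases ht with rfl | ht
      · exact hx
      · exact (ihh.mp hcr) t ht
    · intro hall
      have hx : x ∈ s := hall s (Or.inl rfl)
      have hc1 : 1 ≤ s.count x := List.one_le_count_iff.mpr hx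
      have hcr : rest.flatten.count x = rest.length := ihh.mpr (fun t ht => hall t (Or.inr ht))
      omega

theorem foldl_inter_eq_filter (rest : List (List String)) (s0 : List String) :
    rest.foldl (fun r s => PySem.Set.inter r s) s0
      = s0.filter (fun x => rest.all (fun s => PySem.Set.contains s x)) := by
  induction rest generalizing s0 with
  | nil => simp
  | cons s rest ih =>
    simp only [List.foldl_cons]
    rw [ih]
    show (s0.filter (fun x => PySem.Set.contains s x)).filter _ = _
    rw [List.filter_filter]
    apply List.filter_congr
    intro x _
    simp [Bool.and_comm]

theorem foldl_union_eq_update (tfs : List (List String)) (acc : List String) :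
    tfs.foldl (fun r s => PySem.Set.union r s) acc = PySem.Set.update acc tfs.flatten := by
  induction tfs generalizing acc with
  | nil => rfl
  | cons s rest ih =>
    simp only [List.foldl_cons, List.flatten_cons]
    rw [PySem.Set.update_append]
    exact ih (PySem.Set.union acc s)

theorem filterMap_guard {a : Type} (l : List a) (P : a → Prop) [DecidablePred P] :
    l.filterMap (fun k => if P k then some k else none) = l.filter (fun k => decide (P k)) := by
  induction l with
  | nil => rfl
  | cons x l ih => by_cases h : P x <;> simp [h, ih]

theorem ofList_append_filter (s0 t : List String) (P : String → Bool)
    (hs0 : s0.Nodup) (himp : ∀ x, P x = true → x ∈ s0) :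
    (PySem.Set.ofList (s0 ++ t)).filter P = s0.filter P := by
  rw [PySem.Set.ofList_append, PySem.Set.ofList_eq_self_of_nodup s0 hs0,
      PySem.Set.update_eq_append_filter, List.filter_append]
  have hnil : ((PySem.Set.ofList t).filter (fun y => !(PySem.Set.contains s0 y))).filter P = [] := by
    apply List.filter_eq_nil_iff.mpr
    intro a ha hP
    rcases List.mem_filter.mp ha with ⟨_, hnc⟩
    simp only [Bool.not_eq_eq_eq_not, Bool.not_true] at hnc
    have : PySem.Set.contains s0 a = true := (PySem.Set.contains_iff s0 a).mpr (himp a hP)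
    rw [hnc] at this
    exact Bool.false_ne_true this
  rw [hnil, List.append_nil]

theorem counts_eq_counter (tfs : List (List String)) :
    tfs.foldl (fun d s => s.foldl (fun d x => d.insert x (d.getD x 0 + 1)) d) PySem.Dict.empty
      = PySem.Dict.counter tfs.flatten := by
  rw [← List.foldl_flatten]
  exact PySem.Dict.foldl_insert_getD_add_one_eq_counter _

-- ===== VERDICT (by name: the statement is the Claim_ definition above) =====
theorem combine_tag_fact_sets_py_spec : Claim_equal_combine_tag_fact_sets_py := by
  intro tfs match_all _ hpre
  unfold Spec_combine_tag_fact_sets_py combine_tag_fact_sets_py combine_tag_fact_sets_py_alt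
  rw [counts_eq_counter]
  match tfs with
  | [] => cases match_all <;> rfl
  | s0 :: rest =>
    have hs0 : s0.Nodup := hpre s0 (by simp)
    cases match_all with
    | false =>
      simp only [Bool.false_eq_true, if_false]
      rw [PySem.Dict.keys_counter, PySem.Set.ofList_ofList,
          foldl_union_eq_update, List.flatten_cons]
      rfl
    | true =>
      simp only [if_true]
      rw [PySem.Dict.items_counter, List.filterMap_map]
      have hguard : ((fun p : String × Int => if p.2 = ((s0 :: rest).length : Int) then some p.1 else none) ∘
            (fun k => (k, ((s0 :: rest).flatten.count k : Int))))
          = fun k => if ((((s0 :: rest).flatten.count k : Int)) = ((s0 :: rest).length : Int)) then some k else none := rfl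
      rw [hguard, filterMap_guard]
      set P : String → Bool := fun k => decide ((((s0 :: rest).flatten.count k : Int)) = ((s0 :: rest).length : Int)) with hP
      have hPiff : ∀ x, P x = true ↔ ∀ s ∈ s0 :: rest, x ∈ s := by
        intro x
        rw [hP]
        simp only [decide_eq_true_eq, Int.natCast_inj]
        exact count_flatten_eq_iff (s0 :: rest) x hpre
      have hnodup : ((PySem.Set.ofList (s0 :: rest).flatten).filter P).Nodup :=
        (PySem.Set.nodup_ofList _).filter P
      rw [PySem.Set.ofList_eq_self_of_nodup _ hnodup]
      have hflat : (s0 :: rest).flatten = s0 ++ rest.flatten := rfl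
      rw [hflat, ofList_append_filter s0 rest.flatten P hs0
            (fun x hx => ((hPiff x).mp hx) s0 (by simp))]
      rw [foldl_inter_eq_filter]
      apply List.filter_congr
      intro x hx
      have : (rest.all (fun s => PySem.Set.contains s x)) = true ↔ ∀ s ∈ s0 :: rest, x ∈ s := by
        simp only [List.all_eq_true, List.mem_cons]
        constructor
        · intro hall t ht
          rcases ht with rfl | ht
          · exact hx
          · exact (PySem.Set.contains_iff _ _).mp (hall t ht)
        · intro hall t ht
          exact (PySem.Set.contains_iff _ _).mpr (hall t (Or.inr ht))
      rw [Bool.eq_iff_iff, this, hPiff x]
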